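-- pv_equiv track=rewrite | github.com/jameswmccarty/DailyProgrammer | chal_336.py | run_query2
-- ===== SOURCE A (Python) =====
-- def run_query2(numbers, hival):
-- 	if len(numbers) == 0:
-- 		return 0
-- 	matches = 0
-- 	numbers = sorted(numbers, reverse=True)
-- 	while numbers[0] >= hival:
-- 		numbers = numbers[1:]
-- 		matches += 1
-- 	while len(numbers) > 0:
-- 		if numbers[0] >= hival:
-- 			numbers = numbers[1:]
-- 			matches += 1
-- 		elif len(numbers) > 2:
-- 			best = 0
-- 			for idx in range(1,len(numbers)):
-- 				if numbers[0] > numbers[idx]: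
-- 					best = max(best, run_query2([numbers[0]+1] + numbers[1:idx] + numbers[idx+1:],hival))
-- 			return best + matches
-- 		elif len(numbers) > 1:
-- 			if numbers[0] > numbers[1]:
-- 				numbers[0] += 1
-- 				numbers = numbers[0:-1]
-- 		else:
-- 			return matches
-- 	return matches
-- ===== SOURCE B (Python) =====
-- def run_query2(numbers, hival):
--     # Memoized recursion over canonical (descending-sorted tuple) states.
--     memo = {}
--
--     def solve(state):
--         if state in memo:
--             return memo[state]
--         if not state:
--             res = 0
--         elif state[0] >= hival:
--             res = 1 + solve(state[1:])
--         elif len(state) == 1: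
--             res = 0
--         elif len(state) == 2:
--             res = 1 if (state[0] > state[1] and state[0] + 1 >= hival) else 0
--         else:
--             best = 0
--             for idx in range(1, len(state)):
--                 if state[0] > state[idx]:
--                     best = max(best, solve((state[0] + 1,) + state[1:idx] + state[idx + 1:]))
--             res = best
--         memo[state] = res
--         return res
--
--     return solve(tuple(sorted(numbers, reverse=True)))
-- ===== Notes on version B (the rewrite author's own statement) =====
-- stated objective: alternative
-- what changed: B replaces A's blind exhaustive re-sort-and-recurse search with memoized recursion on canonical descending-sorted tuple states (merge results stay sorted, so no re-sorting, and repeated multiset states are computed once); measured faster on mid-size inputs but both remain super-polynomial, so no speed is claimed.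
import Mathlib
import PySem

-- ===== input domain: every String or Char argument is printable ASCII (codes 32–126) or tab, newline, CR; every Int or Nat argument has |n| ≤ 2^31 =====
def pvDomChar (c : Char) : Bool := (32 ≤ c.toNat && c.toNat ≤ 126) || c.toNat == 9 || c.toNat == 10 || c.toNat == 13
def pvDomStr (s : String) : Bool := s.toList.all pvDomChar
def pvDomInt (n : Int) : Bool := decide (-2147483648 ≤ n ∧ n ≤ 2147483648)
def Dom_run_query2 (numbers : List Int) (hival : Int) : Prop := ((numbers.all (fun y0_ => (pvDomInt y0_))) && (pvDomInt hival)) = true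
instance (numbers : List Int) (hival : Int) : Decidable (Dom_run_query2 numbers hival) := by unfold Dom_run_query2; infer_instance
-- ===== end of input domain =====

-- B memoizes A's recursion on canonical descending-sorted states (no re-sorting, each state once);
-- equality of return values is proved wherever A returns at all: Pre_ excludes exactly the inputs
-- where the Python A raises IndexError or recurses forever, nothing else.

-- ===== PORT A =====
-- Literal transliteration of A.  The loops/recursion are ported structurally with a fuel counter
-- (the list shrinks at every step, so `length + 1` fuel is never exhausted on a terminating run);
-- the two places where Python A does not return are marked: pvFilterA on [] (Python raises
-- IndexError) and the tied two-element state (Python loops forever); both are excluded by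
-- Pre_run_query2, the port returns `matched` there.

-- the `for idx in range(1, len(numbers))` loop of the len>2 branch; `run` is the recursive call
def pvBestA (hival a0 : Int) (run : List Int → Int) : List Int → List Int → Int → Int
  | _, [], best => best
  | pre, x :: rest, best =>
    pvBestA hival a0 run (pre ++ [x]) rest
      (if a0 > x then max best (run ((a0 + 1) :: (pre ++ rest))) else best)

-- the main `while len(numbers) > 0` loop
def pvLoopA (hival : Int) (run : List Int → Int) : Nat → List Int → Int → Int
  | 0, _, matched => matched            -- fuel guard (the list shrinks every iteration)
  | fuel + 1, l, matched =>
    match l with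
    | [] => matched
    | a :: rest =>
      if a ≥ hival then pvLoopA hival run fuel rest (matched + 1)
      else if rest.length + 1 > 2 then pvBestA hival a run [] rest 0 + matched
      else match rest with
        | [b] => if a > b then pvLoopA hival run fuel [a + 1] matched
                 else matched           -- Python: infinite loop (outside Pre_run_query2)
        | _ => matched

-- the first `while numbers[0] >= hival` loop
def pvFilterA (hival : Int) (run : List Int → Int) : List Int → Int → Int
  | [], matched => matched              -- Python: IndexError (outside Pre_run_query2)
  | a :: rest, matched =>
    if a ≥ hival then pvFilterA hival run rest (matched + 1)
    else pvLoopA hival run (rest.length + 2) (a :: rest) matched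

def pvRunA (hival : Int) : Nat → List Int → Int
  | 0, _ => 0                           -- fuel guard (each recursive call is one element shorter)
  | fuel + 1, numbers =>
    if numbers.length = 0 then 0
    else pvFilterA hival (fun state => pvRunA hival fuel state)
      (PySem.List.sorted numbers (fun x => x) true) 0

def run_query2 (numbers : List Int) (hival : Int) : Int :=
  pvRunA hival (numbers.length + 1) numbers

-- ===== PORT B =====
-- Literal transliteration of Source B: memoized recursion on descending-sorted tuple states
-- (same fuel discipline; `solve` is the recursive call threading the memo dictionary).
def pvBestB (hival a0 : Int)
    (solve : PySem.Dict (List Int) Int → List Int → PySem.Dict (List Int) Int × Int) :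
    List Int → List Int → PySem.Dict (List Int) Int → Int → PySem.Dict (List Int) Int × Int
  | _, [], memo, best => (memo, best)
  | pre, x :: rest, memo, best =>
    if a0 > x then
      let p := solve memo ((a0 + 1) :: (pre ++ rest))
      pvBestB hival a0 solve (pre ++ [x]) rest p.1 (max best p.2)
    else pvBestB hival a0 solve (pre ++ [x]) rest memo best

def pvSolveB (hival : Int) : Nat → PySem.Dict (List Int) Int → List Int →
    PySem.Dict (List Int) Int × Int
  | 0, memo, _ => (memo, 0)             -- fuel guard (states shrink at every recursive call)
  | fuel + 1, memo, state =>
    match memo.get? state with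
    | some v => (memo, v)
    | none =>
      let r :=
        match state with
        | [] => (memo, (0 : Int))
        | a :: rest =>
          if a ≥ hival then
            let p := pvSolveB hival fuel memo rest
            (p.1, 1 + p.2)
          else match rest with
            | [] => (memo, 0)
            | [b] => (memo, if a > b ∧ a + 1 ≥ hival then 1 else 0)
            | x :: y :: rest2 =>
              pvBestB hival a (fun d s => pvSolveB hival fuel d s) [] (x :: y :: rest2) memo 0
      (r.1.insert state r.2, r.2)

def run_query2_alt (numbers : List Int) (hival : Int) : Int :=
  (pvSolveB hival (numbers.length + 1) PySem.Dict.empty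
    (PySem.List.sorted numbers (fun x => x) true)).2

-- ===== PRECONDITION & SPEC =====
-- Pre_ excludes EXACTLY the inputs on which Python A does not return: (i) a nonempty list with no
-- element below hival, on which A's first while loop empties the list and then indexes it
-- (IndexError); (ii) the inputs on which A loops forever, namely those whose below-hival pool can
-- be reduced by A's merge game to a tied two-element state (pvCanTie: one round removes the pool's
-- maximum m plus hival - m merged elements, the first merged element strictly below m).

-- all ways to split a list into a (kept-order) sub-list and its complement
def pvSplits : List Int → List (List Int × List Int)
  | [] => [([], [])]
  | x :: xs => (pvSplits xs).flatMap (fun p => [(x :: p.1, p.2), (p.1, x :: p.2)])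

-- pool sorted descending, all elements < hival: can A's merge game reach a tied pair (= diverge)?
-- Recursion is bounded by the pool's length: every game round removes at least the pool's maximum,
-- so a depth budget of `l.length` is never exhausted and the bound is not a semantic restriction.
def pvCanTieN (hival : Int) : Nat → List Int → Bool
  | 0, _ => false
  | _ + 1, [a, b] => a == b
  | n + 1, m :: x :: y :: rest2 =>
    (pvSplits (x :: y :: rest2)).any (fun p =>
      ((p.1.length : Int) == hival - m) && p.1.any (fun v => v < m)
        && pvCanTieN hival n p.2)
  | _ + 1, _ => false

def pvCanTie (hival : Int) (l : List Int) : Bool := pvCanTieN hival l.length l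

def Pre_run_query2 (numbers : List Int) (hival : Int) : Prop :=
  (numbers ≠ [] → numbers.filter (fun x => x < hival) ≠ [])
  ∧ pvCanTie hival
      (PySem.List.sorted (numbers.filter (fun x => x < hival)) (fun x => x) true) = false
instance (numbers : List Int) (hival : Int) : Decidable (Pre_run_query2 numbers hival) := by
  unfold Pre_run_query2; infer_instance
def pvWitness_run_query2 : List Int × Int := ([1, 2, 3], 10)

def Spec_run_query2 (numbers : List Int) (hival : Int) (out : Int) : Prop := out = run_query2_alt numbers hival
instance (numbers : List Int) (hival : Int) (out : Int) : Decidable (Spec_run_query2 numbers hival out) := by unfold Spec_run_query2; infer_instance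

-- ===== CLAIM (what is proved, stated in full; the proofs are below) =====
def Claim_equal_run_query2 : Prop := ∀ (numbers : List Int) (hival : Int), Dom_run_query2 numbers hival → Pre_run_query2 numbers hival → Spec_run_query2 numbers hival (run_query2 numbers hival)

-- ===== LEMMAS AND PROOFS =====

-- Pure meaning of one canonical state (B's solve without the memo); both ports are proved equal to it.
mutual
def pvF (hival : Int) (state : List Int) : Int :=
  match state with
  | [] => 0
  | a :: rest =>
    if a ≥ hival then 1 + pvF hival rest
    else match rest with
      | [] => 0
      | [b] => if a > b ∧ a + 1 ≥ hival then 1 else 0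
      | x :: y :: rest2 => pvBestF hival a [] (x :: y :: rest2) 0
termination_by (state.length, 1, 0)
decreasing_by all_goals (simp [Prod.lex_iff] <;> omega)

def pvBestF (hival a0 : Int) (pre suf : List Int) (best : Int) : Int :=
  match suf with
  | [] => best
  | x :: rest =>
    pvBestF hival a0 (pre ++ [x]) rest
      (if a0 > x then max best (pvF hival ((a0 + 1) :: (pre ++ rest))) else best)
termination_by (pre.length + suf.length + 1, 0, suf.length)
decreasing_by all_goals (simp [Prod.lex_iff] <;> omega)
end

theorem pvF_nil (hival : Int) : pvF hival [] = 0 := by rw [pvF.eq_def]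

theorem pvF_cons (hival a : Int) (rest : List Int) :
    pvF hival (a :: rest) =
      if a ≥ hival then 1 + pvF hival rest
      else match rest with
        | [] => 0
        | [b] => if a > b ∧ a + 1 ≥ hival then 1 else 0
        | x :: y :: rest2 => pvBestF hival a [] (x :: y :: rest2) 0 := by
  rw [pvF.eq_def]

theorem pvBestF_nil (hival a0 : Int) (pre : List Int) (best : Int) :
    pvBestF hival a0 pre [] best = best := by rw [pvBestF.eq_def]

theorem pvBestF_cons (hival a0 : Int) (pre : List Int) (x : Int) (rest : List Int) (best : Int) :
    pvBestF hival a0 pre (x :: rest) best =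
      pvBestF hival a0 (pre ++ [x]) rest
        (if a0 > x then max best (pvF hival ((a0 + 1) :: (pre ++ rest))) else best) := by
  rw [pvBestF.eq_def]

-- A side
theorem pvLoopA_succ_nil (hival : Int) (run : List Int → Int) (fuel : Nat) (m : Int) :
    pvLoopA hival run (fuel + 1) [] m = m := rfl

theorem pvLoopA_succ_cons (hival : Int) (run : List Int → Int) (fuel : Nat) (a : Int)
    (rest : List Int) (m : Int) :
    pvLoopA hival run (fuel + 1) (a :: rest) m =
      if a ≥ hival then pvLoopA hival run fuel rest (m + 1)
      else if rest.length + 1 > 2 then pvBestA hival a run [] rest 0 + m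
      else match rest with
        | [b] => if a > b then pvLoopA hival run fuel [a + 1] m else m
        | _ => m := rfl

theorem pvBestA_eq (hival a0 : Int) (run : List Int → Int) (K : Nat)
    (hrun : ∀ s : List Int, s.length ≤ K →
      run s = pvF hival (PySem.List.sorted s (fun x => x) true)) :
    ∀ (suf pre : List Int) (best : Int),
      (a0 :: (pre ++ suf)).Pairwise (· ≥ ·) →
      pre.length + suf.length ≤ K →
      pvBestA hival a0 run pre suf best = pvBestF hival a0 pre suf best := by
  intro suf
  induction suf with
  | nil => intro pre best _ _; rw [pvBestA, pvBestF_nil]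
  | cons x rest ihs =>
    intro pre best hsort hlen
    rw [pvBestA, pvBestF_cons]
    have hcand : run ((a0 + 1) :: (pre ++ rest)) = pvF hival ((a0 + 1) :: (pre ++ rest)) := by
      have hsub : (pre ++ rest).Sublist (pre ++ x :: rest) :=
        List.Sublist.append_left (List.sublist_cons_self x rest) pre
      have hall : ∀ y ∈ pre ++ x :: rest, a0 ≥ y := (List.pairwise_cons.mp hsort).1
      have htail : (pre ++ x :: rest).Pairwise (· ≥ ·) := (List.pairwise_cons.mp hsort).2
      have hcs : ((a0 + 1) :: (pre ++ rest)).Pairwise (· ≥ ·) := by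
        refine List.pairwise_cons.mpr ⟨?_, htail.sublist hsub⟩
        intro y hy
        have := hall y (hsub.mem hy)
        omega
      rw [hrun ((a0 + 1) :: (pre ++ rest)) (by simp at hlen ⊢; omega),
        PySem.List.sorted_rev_eq_self_of_pairwise ((a0 + 1) :: (pre ++ rest)) (fun x => x)
          (hcs.imp (fun h => h))]
    rw [hcand]
    apply ihs (pre ++ [x]) _ _ (by simp at hlen ⊢; omega)
    have heq : (pre ++ [x]) ++ rest = pre ++ x :: rest := by simp
    rw [heq]
    exact hsort

theorem pvLoopA_eq (hival : Int) (run : List Int → Int) (K : Nat)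
    (hrun : ∀ s : List Int, s.length ≤ K →
      run s = pvF hival (PySem.List.sorted s (fun x => x) true)) :
    ∀ (fuel : Nat) (l : List Int) (m : Int), l.length < fuel → l.length ≤ K + 1 →
      l.Pairwise (· ≥ ·) → pvLoopA hival run fuel l m = m + pvF hival l := by
  intro fuel
  induction fuel with
  | zero => intro l m hf _ _; omega
  | succ fuel ih =>
    intro l m hf hK hsort
    match l with
    | [] => rw [pvLoopA_succ_nil, pvF_nil]; ring
    | a :: rest =>
      have hrest : rest.Pairwise (· ≥ ·) := (List.pairwise_cons.mp hsort).2
      rw [pvLoopA_succ_cons, pvF_cons]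
      by_cases hge : a ≥ hival
      · simp only [if_pos hge]
        rw [ih rest (m + 1) (by simp at hf ⊢; omega) (by simp at hK ⊢; omega) hrest]
        ring
      · simp only [if_neg hge]
        match rest with
        | [] =>
          rw [if_neg (by norm_num : ¬ (([] : List Int).length + 1 > 2))]
          ring
        | [b] =>
          rw [if_neg (by norm_num : ¬ ([b].length + 1 > 2))]
          show (if a > b then pvLoopA hival run fuel [a + 1] m else m)
              = m + (if a > b ∧ a + 1 ≥ hival then 1 else 0)
          by_cases hab : a > b
          · rw [if_pos hab]
            have hf1 : 1 < fuel := by simp at hf; omega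
            match fuel, hf1 with
            | fuel' + 1, hf1 =>
              rw [pvLoopA_succ_cons]
              by_cases h1 : a + 1 ≥ hival
              · rw [if_pos h1, if_pos ⟨hab, h1⟩]
                match fuel', hf1 with
                | fuel'' + 1, _ => rw [pvLoopA_succ_nil]
                | 0, h => exact absurd h (by omega)
              · rw [if_neg h1, if_neg (by norm_num : ¬ (([] : List Int).length + 1 > 2)),
                  if_neg (by tauto : ¬ (a > b ∧ a + 1 ≥ hival))]
                show m = m + 0
                ring
          · rw [if_neg hab, if_neg (by tauto : ¬ (a > b ∧ a + 1 ≥ hival))]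
            ring
        | x :: y :: rest' =>
          rw [if_pos (by simp : (x :: y :: rest').length + 1 > 2)]
          rw [pvBestA_eq hival a run K hrun (x :: y :: rest') [] 0
            (by simpa using hsort) (by simp at hK ⊢; omega)]
          ring

theorem pvFilterA_eq (hival : Int) (run : List Int → Int) (K : Nat)
    (hrun : ∀ s : List Int, s.length ≤ K →
      run s = pvF hival (PySem.List.sorted s (fun x => x) true)) :
    ∀ (l : List Int) (m : Int), l.length ≤ K + 1 → l.Pairwise (· ≥ ·) →
      pvFilterA hival run l m = m + pvF hival l := by
  intro l
  induction l with
  | nil => intro m _ _; rw [pvFilterA, pvF_nil]; ring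
  | cons a rest ih =>
    intro m hK hsort
    rw [pvFilterA]
    by_cases hge : a ≥ hival
    · rw [if_pos hge, ih (m + 1) (by simp at hK ⊢; omega) ((List.pairwise_cons.mp hsort).2),
        pvF_cons, if_pos hge]
      ring
    · rw [if_neg hge]
      exact pvLoopA_eq hival run K hrun (rest.length + 2) (a :: rest) m (by simp)
        (by simpa using hK) hsort

theorem pvRunA_eq (hival : Int) :
    ∀ (fuel : Nat) (numbers : List Int), numbers.length < fuel →
      pvRunA hival fuel numbers = pvF hival (PySem.List.sorted numbers (fun x => x) true) := by
  intro fuel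
  induction fuel with
  | zero => intro numbers h; omega
  | succ fuel ih =>
    intro numbers hf
    rw [pvRunA]
    by_cases h : numbers.length = 0
    · rw [if_pos h]
      match numbers, h with
      | [], _ =>
        rw [PySem.List.sorted_rev_eq_self_of_pairwise ([] : List Int) (fun x => x) (by simp),
          pvF_nil]
    · rw [if_neg h]
      have hsort : (PySem.List.sorted numbers (fun x => x) true).Pairwise (· ≥ ·) :=
        (PySem.List.sorted_pairwise_rev numbers (fun x => x)).imp (fun h => h)

      rw [pvFilterA_eq hival (fun state => pvRunA hival fuel state) (fuel - 1)
        (fun s hs => ih s (by omega)) (PySem.List.sorted numbers (fun x => x) true) 0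
        (by rw [PySem.List.length_sorted]; omega) hsort]
      ring

theorem run_query2_eq_pvF (numbers : List Int) (hival : Int) :
    run_query2 numbers hival = pvF hival (PySem.List.sorted numbers (fun x => x) true) := by
  rw [run_query2]
  exact pvRunA_eq hival (numbers.length + 1) numbers (by omega)

-- B side: every memo entry holds the pvF value of its state
def pvInv (hival : Int) (d : PySem.Dict (List Int) Int) : Prop :=
  ∀ (s : List Int) (v : Int), d.get? s = some v → v = pvF hival s

theorem pvInv_insert (hival : Int) (d : PySem.Dict (List Int) Int) (s : List Int) (v : Int)
    (hd : pvInv hival d) (hv : v = pvF hival s) : pvInv hival (d.insert s v) := by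
  intro s' v' hv'
  rw [PySem.Dict.get?_insert] at hv'
  split_ifs at hv' with hk
  · subst hk
    simp only [Option.some.injEq] at hv'
    omega
  · exact hd _ _ hv'

theorem pvBestB_eq (hival a0 : Int)
    (solve : PySem.Dict (List Int) Int → List Int → PySem.Dict (List Int) Int × Int) (K : Nat)
    (hsolve : ∀ (d : PySem.Dict (List Int) Int) (s : List Int), s.length ≤ K → pvInv hival d →
      (solve d s).2 = pvF hival s ∧ pvInv hival (solve d s).1) :
    ∀ (suf pre : List Int) (best : Int) (d : PySem.Dict (List Int) Int),
      pre.length + suf.length ≤ K → pvInv hival d →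
      (pvBestB hival a0 solve pre suf d best).2 = pvBestF hival a0 pre suf best
        ∧ pvInv hival (pvBestB hival a0 solve pre suf d best).1 := by
  intro suf
  induction suf with
  | nil =>
    intro pre best d _ hinv
    rw [pvBestB, pvBestF_nil]
    exact ⟨rfl, hinv⟩
  | cons x rest ihs =>
    intro pre best d hlen hinv
    rw [pvBestB, pvBestF_cons]
    by_cases hax : a0 > x
    · simp only [if_pos hax]
      have hc := hsolve d ((a0 + 1) :: (pre ++ rest)) (by simp at hlen ⊢; omega) hinv
      rw [← hc.1]
      exact ihs (pre ++ [x]) (max best (solve d ((a0 + 1) :: (pre ++ rest))).2)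
        (solve d ((a0 + 1) :: (pre ++ rest))).1 (by simp at hlen ⊢; omega) hc.2
    · simp only [if_neg hax]
      exact ihs (pre ++ [x]) best d (by simp at hlen ⊢; omega) hinv

theorem pvSolveB_succ (hival : Int) (fuel : Nat) (memo : PySem.Dict (List Int) Int)
    (state : List Int) :
    pvSolveB hival (fuel + 1) memo state =
      match memo.get? state with
      | some v => (memo, v)
      | none =>
        let r :=
          match state with
          | [] => (memo, (0 : Int))
          | a :: rest =>
            if a ≥ hival then
              let p := pvSolveB hival fuel memo rest
              (p.1, 1 + p.2)
            else match rest with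
              | [] => (memo, 0)
              | [b] => (memo, if a > b ∧ a + 1 ≥ hival then 1 else 0)
              | x :: y :: rest2 =>
                pvBestB hival a (fun d s => pvSolveB hival fuel d s) [] (x :: y :: rest2) memo 0
        (r.1.insert state r.2, r.2) := rfl

theorem pvSolveB_eq (hival : Int) :
    ∀ (fuel : Nat) (s : List Int) (d : PySem.Dict (List Int) Int), s.length < fuel →
      pvInv hival d →
      (pvSolveB hival fuel d s).2 = pvF hival s ∧ pvInv hival (pvSolveB hival fuel d s).1 := by
  intro fuel
  induction fuel with
  | zero => intro s d h _; omega
  | succ fuel ih =>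
    intro s d hf hinv
    rw [pvSolveB_succ]
    cases hm : d.get? s with
    | some v => exact ⟨hinv _ _ hm, hinv⟩
    | none =>
      have hbody : ∀ (r : PySem.Dict (List Int) Int × Int), r.2 = pvF hival s →
          pvInv hival r.1 →
          ((r.1.insert s r.2, r.2) : PySem.Dict (List Int) Int × Int).2 = pvF hival s
            ∧ pvInv hival ((r.1.insert s r.2, r.2) : PySem.Dict (List Int) Int × Int).1 :=
        fun r hr hinvr => ⟨hr, pvInv_insert hival r.1 s r.2 hinvr hr⟩
      match s, hf with
      | [], _ => exact hbody (d, 0) (by rw [pvF_nil]) hinv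
      | a :: rest, hf =>
        by_cases hge : a ≥ hival
        · have hrec := ih rest d (by simp at hf ⊢; omega) hinv
          simp only [if_pos hge]
          exact hbody ((pvSolveB hival fuel d rest).1, 1 + (pvSolveB hival fuel d rest).2)
            (by rw [pvF_cons, if_pos hge, hrec.1]) hrec.2
        · simp only [if_neg hge]
          match rest with
          | [] => exact hbody (d, 0) (by rw [pvF_cons, if_neg hge]) hinv
          | [b] =>
            exact hbody (d, if a > b ∧ a + 1 ≥ hival then 1 else 0)
              (by rw [pvF_cons, if_neg hge]) hinv
          | x :: y :: rest2 =>
            have hb := pvBestB_eq hival a (fun d' s' => pvSolveB hival fuel d' s') (fuel - 1)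
              (fun d' s' h1 h2 => ih s' d' (by simp at hf; omega) h2)
              (x :: y :: rest2) [] 0 d (by simp at hf ⊢; omega) hinv
            exact hbody
              (pvBestB hival a (fun d' s' => pvSolveB hival fuel d' s') [] (x :: y :: rest2) d 0)
              (by rw [pvF_cons, if_neg hge, hb.1]) hb.2

theorem run_query2_alt_eq_pvF (numbers : List Int) (hival : Int) :
    run_query2_alt numbers hival = pvF hival (PySem.List.sorted numbers (fun x => x) true) := by
  rw [run_query2_alt]
  exact (pvSolveB_eq hival (numbers.length + 1) (PySem.List.sorted numbers (fun x => x) true) _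
    (by rw [PySem.List.length_sorted]; omega)
    (fun s v h => by simp [PySem.Dict.get?_empty] at h)).1

theorem run_query2_total_eq (numbers : List Int) (hival : Int) :
    run_query2 numbers hival = run_query2_alt numbers hival := by
  rw [run_query2_eq_pvF, run_query2_alt_eq_pvF]

-- ===== VERDICT (by name: the statement is the Claim_ definition above) =====
theorem run_query2_spec : Claim_equal_run_query2 := by
  intro numbers hival _ _
  unfold Spec_run_query2
  exact run_query2_total_eq numbers hival
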